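-- pv_equiv track=rewrite | github.com/jkearney126/maxwell_bot | agent/agent.py | _build_use_case_map
-- ===== SOURCE A (Python) =====
-- def _build_use_case_map(lines: list) -> dict:
--     """Build a mapping from tool names to descriptions from the Use Case table."""
--     use_case_map = {}
--     in_table = False
--     for line in lines:
--         if "## Use Case Decision Table" in line:
--             in_table = True
--         elif line.startswith("## ") and "Use Case" not in line:
--             in_table = False
--         elif in_table and "|" in line and "`" in line:
--             # Parse table row like "| Solenoid/coil field strength | `solenoid_field` | Use when... |"
--             parts = line.split("|")
--             if len(parts) >= 3:
--                 tool_part = parts[2].strip()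
--                 desc_part = parts[1].strip()
--                 # Extract tool name from backticks
--                 if "`" in tool_part:
--                     tool_name = tool_part.strip("`").strip()
--                     use_case_map[tool_name] = desc_part
--     return use_case_map
-- ===== SOURCE B (Python) =====
-- def _build_use_case_map(lines: list) -> dict:
--     """Two staged passes: first segment the document into the table blocks
--     (the runs of lines belonging to a Use Case table), then parse the rows
--     of every block into the map."""
--     HEADER = "## Use Case Decision Table"
--     # phase 1: segmentation — split the document into table blocks
--     blocks = []
--     current = None
--     for line in lines:
--         if HEADER in line:
--             if current is not None:
--                 blocks.append(current)
--             current = []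
--         elif line.startswith("## ") and "Use Case" not in line:
--             if current is not None:
--                 blocks.append(current)
--                 current = None
--         elif current is not None:
--             current.append(line)
--     if current is not None:
--         blocks.append(current)
--     # phase 2: row parsing — independent of any section state
--     use_case_map = {}
--     for block in blocks:
--         for line in block:
--             if "|" in line and "`" in line:
--                 parts = line.split("|")
--                 if len(parts) >= 3:
--                     tool_part = parts[2].strip()
--                     if "`" in tool_part:
--                         use_case_map[tool_part.strip("`").strip()] = parts[1].strip()
--     return use_case_map
-- ===== Notes on version B (the rewrite author's own statement) =====
-- stated objective: alternative
-- what changed: Replaces A's single flag-driven scan with two staged passes: phase 1 segments the document into a list of table blocks (region location), phase 2 parses the rows of those blocks into the map; the in_table boolean and the interleaving of region tracking with row parsing disappear.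
import Mathlib
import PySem

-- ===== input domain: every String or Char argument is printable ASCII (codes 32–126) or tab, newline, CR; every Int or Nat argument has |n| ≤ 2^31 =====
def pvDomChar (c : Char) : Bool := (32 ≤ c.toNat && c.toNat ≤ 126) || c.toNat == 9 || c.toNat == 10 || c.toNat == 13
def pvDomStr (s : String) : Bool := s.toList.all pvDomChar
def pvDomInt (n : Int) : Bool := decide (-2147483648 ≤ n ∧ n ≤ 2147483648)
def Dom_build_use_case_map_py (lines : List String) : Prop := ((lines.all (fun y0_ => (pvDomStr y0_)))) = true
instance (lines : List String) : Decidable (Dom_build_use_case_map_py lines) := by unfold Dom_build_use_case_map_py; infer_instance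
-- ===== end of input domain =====

-- B replaces A's single flag-driven scan with two staged passes (segment into table blocks, then parse rows); objective: alternative decomposition, same cost.

-- shared helpers: the three line tests and the row-parsing update (identical text in both Pythons)
def pvIsHeader (l : String) : Bool := PySem.Str.isIn "## Use Case Decision Table" l
def pvIsClosing (l : String) : Bool := PySem.Str.startswith l "## " && !(PySem.Str.isIn "Use Case" l)
def pvIsRowish (l : String) : Bool := PySem.Str.isIn "|" l && PySem.Str.isIn "`" l
def pvRowUpd (l : String) (m : PySem.Dict String String) : PySem.Dict String String :=
  let parts := (PySem.Str.split? l "|").getD []   -- sep "|" ≠ "" so split? is always some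
  match parts with
  | p0 :: p1 :: p2 :: _ =>   -- len(parts) >= 3
    let _ := p0
    let tool_part := PySem.Str.strip p2
    let desc_part := PySem.Str.strip p1
    if PySem.Str.isIn "`" tool_part then
      m.insert (PySem.Str.strip (PySem.Str.stripChars tool_part "`")) desc_part
    else m
  | _ => m

-- ===== PORT A =====
def build_use_case_map_py (lines : List String) : List (String × String) :=
  (lines.foldl (fun st line =>
      if pvIsHeader line then (st.1, true)
      else if pvIsClosing line then (st.1, false)
      else if st.2 && pvIsRowish line then (pvRowUpd line st.1, st.2)
      else st)
    ((PySem.Dict.empty : PySem.Dict String String), false)).1.items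

-- ===== PORT B =====
-- phase 1 step: fold state is (finished blocks, current open block or none)
def pvSegStep (st : List (List String) × Option (List String)) (line : String) :
    List (List String) × Option (List String) :=
  if pvIsHeader line then
    (match st.2 with
     | some c => (st.1 ++ [c], some [])
     | none => (st.1, some []))
  else if pvIsClosing line then
    (match st.2 with
     | some c => (st.1 ++ [c], none)
     | none => st)
  else
    (match st.2 with
     | some c => (st.1, some (c ++ [line]))
     | none => st)

def pvSegFinish (st : List (List String) × Option (List String)) : List (List String) :=
  match st.2 with
  | some c => st.1 ++ [c]
  | none => st.1

-- phase 2: parse the rows of every block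
def pvParseBlocks (blocks : List (List String)) (m : PySem.Dict String String) :
    PySem.Dict String String :=
  blocks.foldl (fun m b => b.foldl (fun m l => if pvIsRowish l then pvRowUpd l m else m) m) m

def build_use_case_map_py_alt (lines : List String) : List (String × String) :=
  (pvParseBlocks (pvSegFinish (lines.foldl pvSegStep ([], none))) PySem.Dict.empty).items

-- ===== PRECONDITION & SPEC =====
def Spec_build_use_case_map_py (lines : List String) (out : List (String × String)) : Prop := out = build_use_case_map_py_alt lines
instance (lines : List String) (out : List (String × String)) : Decidable (Spec_build_use_case_map_py lines out) := by unfold Spec_build_use_case_map_py; infer_instance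

-- ===== CLAIM (what is proved, stated in full; the proofs are below) =====
def Claim_equal_build_use_case_map_py : Prop := ∀ (lines : List String), Dom_build_use_case_map_py lines → Spec_build_use_case_map_py lines (build_use_case_map_py lines)

-- ===== LEMMAS AND PROOFS =====

-- the fold step of port A, named for the proofs
def pvStep (st : PySem.Dict String String × Bool) (line : String) : PySem.Dict String String × Bool :=
  if pvIsHeader line then (st.1, true)
  else if pvIsClosing line then (st.1, false)
  else if st.2 && pvIsRowish line then (pvRowUpd line st.1, st.2)
  else st

theorem pvParseBlocks_append (bs : List (List String)) (b : List String)
    (m : PySem.Dict String String) :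
    pvParseBlocks (bs ++ [b]) m
      = b.foldl (fun m l => if pvIsRowish l then pvRowUpd l m else m) (pvParseBlocks bs m) := by
  simp [pvParseBlocks]

-- invariant linking A's flag fold to B's segmentation-then-parse pipeline
theorem pvMain (rest : List String) :
    ∀ (acc : List (List String)) (cur : Option (List String)) (m : PySem.Dict String String),
    pvParseBlocks (pvSegFinish (rest.foldl pvSegStep (acc, cur))) m
      = (rest.foldl pvStep (pvParseBlocks (pvSegFinish (acc, cur)) m, cur.isSome)).1 := by
  induction rest with
  | nil => intro acc cur m; simp
  | cons l ls ih =>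
    intro acc cur m
    by_cases h : pvIsHeader l = true
    · cases cur with
      | none =>
        simp only [List.foldl_cons, pvSegStep, pvStep, h, if_pos]
        rw [ih]
        simp [pvSegFinish, pvParseBlocks]
      | some c =>
        simp only [List.foldl_cons, pvSegStep, pvStep, h, if_pos]
        rw [ih]
        simp [pvSegFinish, pvParseBlocks]
    · by_cases hc : pvIsClosing l = true
      · cases cur with
        | none =>
          simp only [List.foldl_cons, pvSegStep, pvStep, h, hc]
          rw [ih]; simp
        | some c =>
          simp only [List.foldl_cons, pvSegStep, pvStep, h, hc]
          rw [ih]; simp [pvSegFinish]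
      · cases cur with
        | none =>
          simp only [List.foldl_cons, pvSegStep, pvStep, h, hc]
          rw [ih]; simp
        | some c =>
          simp only [List.foldl_cons, pvSegStep, pvStep, h, hc]
          rw [ih]
          by_cases hr : pvIsRowish l = true <;>
            simp [pvSegFinish, pvParseBlocks_append, List.foldl_append, hr]

-- ===== VERDICT (by name: the statement is the Claim_ definition above) =====
theorem build_use_case_map_py_spec : Claim_equal_build_use_case_map_py := by
  intro lines _
  show build_use_case_map_py lines = build_use_case_map_py_alt lines
  unfold build_use_case_map_py build_use_case_map_py_alt
  rw [show (fun (st : PySem.Dict String String × Bool) line =>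
      if pvIsHeader line then (st.1, true)
      else if pvIsClosing line then (st.1, false)
      else if st.2 && pvIsRowish line then (pvRowUpd line st.1, st.2)
      else st) = pvStep from rfl]
  rw [pvMain lines [] none PySem.Dict.empty]
  simp [pvSegFinish, pvParseBlocks]
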